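-- pv_equiv track=rewrite | github.com/Opselicandro/conversor_base-2-5.8-10-16 | conversor_binario.py | int_base5
-- ===== SOURCE A (Python) =====
-- def int_base5(j):
--     n = str(j)
--     s = list(n)
--     d = 0
--     convertido = 0
--     t = len(s)
--     t -= 1
--     while True:
--         for i in s:
--             c = int(i) * (pow(5, t))
--             convertido += int(c)
--             t -= 1
--             d += 1
--             if t < 0:
--                 break
--         return convertido
-- ===== SOURCE B (Python) =====
-- def int_base5(j):
--     convertido = 0
--     for ch in str(j):
--         convertido = convertido * 5 + int(ch)
--     return convertido
-- ===== Notes on version B (the rewrite author's own statement) =====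
-- stated objective: simpler
-- what changed: Replaces the power-weighted sum (each digit times pow(5, descending exponent) with manual index bookkeeping and a break) by Horner's method: a single left-to-right fold convertido = convertido*5 + int(ch), no pow and no exponent counter.
-- outside the precondition, e.g. on int_base5(-3): A raises ValueError, B raises ValueError
import Mathlib
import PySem

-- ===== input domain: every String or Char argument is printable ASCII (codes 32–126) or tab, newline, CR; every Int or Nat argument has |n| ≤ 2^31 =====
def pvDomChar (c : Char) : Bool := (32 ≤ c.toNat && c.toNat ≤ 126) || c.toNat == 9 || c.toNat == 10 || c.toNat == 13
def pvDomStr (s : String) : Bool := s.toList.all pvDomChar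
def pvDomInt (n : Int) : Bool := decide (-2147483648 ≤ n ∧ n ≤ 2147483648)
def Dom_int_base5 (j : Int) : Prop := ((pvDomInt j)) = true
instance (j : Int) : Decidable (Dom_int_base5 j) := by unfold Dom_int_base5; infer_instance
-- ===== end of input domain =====

-- B replaces the power-weighted digit sum by a Horner fold (convertido*5 + digit), objective: simpler.

-- int(ch) for a single character: exact for the decimal-digit characters, which are
-- the only characters of str(j) once Pre_ (j ≥ 0) holds.
def pyDigit (c : Char) : Int := (c.toNat : Int) - 48

-- ===== PORT A =====
-- the for-loop of A: exponent t used, then decremented; the 'if t < 0: break' (followed by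
-- the unconditional return) ends the loop; exhausting the list also returns convertido.
def int_base5_go : List Char → Int → Int → Int
  | [], _, convertido => convertido
  | i :: rest, t, convertido =>
    let c : Int := pyDigit i * 5 ^ t.toNat
    let convertido' := convertido + c
    if t - 1 < 0 then convertido' else int_base5_go rest (t - 1) convertido'

def int_base5 (j : Int) : Int :=
  let n := PySem.Int.toStr j
  let s := n.toList
  int_base5_go s ((s.length : Int) - 1) 0

-- ===== PORT B =====
def int_base5_alt (j : Int) : Int :=
  (PySem.Int.toStr j).toList.foldl (fun convertido ch => convertido * 5 + pyDigit ch) 0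

-- ===== PRECONDITION & SPEC =====
-- Pre_ excludes j < 0, where str(j) starts with '-' and int('-') raises ValueError in both A and B.
def Pre_int_base5 (j : Int) : Prop := 0 ≤ j
instance (j : Int) : Decidable (Pre_int_base5 j) := by unfold Pre_int_base5; infer_instance
def pvWitness_int_base5 : Int := (123)
def Spec_int_base5 (j : Int) (out : Int) : Prop := out = int_base5_alt j
instance (j : Int) (out : Int) : Decidable (Spec_int_base5 j out) := by unfold Spec_int_base5; infer_instance

-- ===== CLAIM (what is proved, stated in full; the proofs are below) =====
def Claim_equal_int_base5 : Prop := ∀ (j : Int), Dom_int_base5 j → Pre_int_base5 j → Spec_int_base5 j (int_base5 j)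

-- ===== LEMMAS AND PROOFS =====

-- value of a digit string as a base-5 polynomial, digit-by-digit
def pvPoly : List Char → Int
  | [] => 0
  | c :: r => pyDigit c * 5 ^ r.length + pvPoly r

theorem go_cons (i : Char) (rest : List Char) (t conv : Int) :
    int_base5_go (i :: rest) t conv
      = if t - 1 < 0 then conv + pyDigit i * 5 ^ t.toNat
        else int_base5_go rest (t - 1) (conv + pyDigit i * 5 ^ t.toNat) := rfl

theorem pv_go_eq (s : List Char) : ∀ conv : Int,
    int_base5_go s ((s.length : Int) - 1) conv = conv + pvPoly s := by
  induction s with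
  | nil => intro conv; simp [int_base5_go, pvPoly]
  | cons c rest ih =>
    intro conv
    cases rest with
    | nil => simp [int_base5_go, pvPoly, pyDigit]
    | cons x xs =>
      have hlen : ((c :: x :: xs).length : Int) - 1 = ((x :: xs).length : Int) := by
        simp
      rw [hlen, go_cons]
      have h1 : ¬ (((x :: xs).length : Int) - 1 < 0) := by
        simp
      rw [if_neg h1, ih]
      have h2 : (((x :: xs).length : Int)).toNat = (x :: xs).length := by
        omega
      simp [pvPoly, h2]
      ring

theorem pv_horner_eq (s : List Char) : ∀ a : Int,
    s.foldl (fun convertido ch => convertido * 5 + pyDigit ch) a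
      = a * 5 ^ s.length + pvPoly s := by
  induction s with
  | nil => intro a; simp [pvPoly]
  | cons c rest ih =>
    intro a
    simp only [List.foldl, pvPoly, List.length_cons, ih (a * 5 + pyDigit c)]
    ring

-- ===== VERDICT (by name: the statement is the Claim_ definition above) =====
theorem int_base5_spec : Claim_equal_int_base5 := by
  intro j _ _
  unfold Spec_int_base5 int_base5 int_base5_alt
  rw [pv_go_eq, pv_horner_eq]
  ring
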